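-- pv_equiv track=rewrite | github.com/manuel-delverme/sapienza-lessons | s1/nlp/project/not_used/hw1.py | get_sub_morphemes
-- ===== SOURCE A (Python) =====
-- def get_sub_morphemes(word, training_morphemes):
--     # yields a list of morphemes
--     if len(word) == 0:
--         yield []
--
--     for morpheme in training_morphemes:
--         if word.find(morpheme) == 0:
--             subword = word[len(morpheme):]
--             for submorphemes in get_sub_morphemes(subword, training_morphemes):
--                 yield [word] + submorphemes
-- ===== SOURCE B (Python) =====
-- def get_sub_morphemes(word, training_morphemes):
--     # Bottom-up DP over suffix start positions: results[i] holds the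
--     # segmentations of word[i:], built from the end of the word backwards.
--     n = len(word)
--     results = {n: [[]]}
--     for i in reversed(range(n)):
--         rem = word[i:]
--         segs = []
--         for m in training_morphemes:
--             if rem.startswith(m) and m != "":
--                 for sub in results[i + len(m)]:
--                     segs.append([rem] + sub)
--         results[i] = segs
--     return results[0]
-- ===== Notes on version B (the rewrite author's own statement) =====
-- stated objective: alternative
-- what changed: top-down recursive generator replaced by a bottom-up dynamic program that tabulates the segmentations of every suffix of the word once, from the end of the word backwards
import Mathlib
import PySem

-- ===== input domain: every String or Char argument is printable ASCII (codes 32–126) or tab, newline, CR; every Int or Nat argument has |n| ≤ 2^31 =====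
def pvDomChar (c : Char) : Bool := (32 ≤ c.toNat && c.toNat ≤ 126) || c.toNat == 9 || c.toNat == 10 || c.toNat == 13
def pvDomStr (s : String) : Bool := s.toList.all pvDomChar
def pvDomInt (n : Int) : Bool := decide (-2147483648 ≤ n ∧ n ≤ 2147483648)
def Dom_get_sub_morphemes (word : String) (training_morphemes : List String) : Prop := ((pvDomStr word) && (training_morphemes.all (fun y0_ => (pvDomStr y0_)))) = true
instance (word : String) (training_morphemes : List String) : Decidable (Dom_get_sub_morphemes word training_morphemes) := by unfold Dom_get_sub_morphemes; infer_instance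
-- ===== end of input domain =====

-- B replaces A's top-down recursive enumeration by a bottom-up table over the word's suffixes (objective: alternative decomposition); equivalence is proved for morpheme lists without the empty string (A recurses forever there).


-- ===== PORT A =====
-- A's recursive generator, listed; strings carried as List Char (PySem bridge).
-- `word.find(morpheme) == 0` is `PySem.Chars.find w m.toList = 0`;
-- `word[len(morpheme):]` with its nonnegative index is `List.drop` (PySem.List.slice_from_natCast).
-- fuel `length + 1`: a pure totality guard — every run that terminates in Python strictly
-- shortens the word at each recursion, so this fuel is never exhausted inside Pre_.
def getSubACore (tm : List String) : Nat → List Char → List (List String)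
  | 0, _ => []
  | fuel+1, w =>
    (if w.length = 0 then [[]] else []) ++
    tm.foldl (fun acc m =>
      if PySem.Chars.find w m.toList = 0 then
        acc ++ (getSubACore tm fuel (w.drop m.toList.length)).map (fun sub => String.ofList w :: sub)
      else acc) []

def get_sub_morphemes (word : String) (training_morphemes : List String) : List (List String) :=
  getSubACore training_morphemes (word.toList.length + 1) word.toList

-- ===== PORT B =====
-- body of B's `for i in reversed(range(n))` loop; the dict `results` keys are the
-- loop indices 0..n, all nonnegative, hence Nat keys are exact here.
def getSubBBody (tm : List String) (w : List Char) (d : PySem.Dict Nat (List (List String))) (i : Nat) : PySem.Dict Nat (List (List String)) :=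
  let rem := w.drop i           -- word[i:] (nonnegative index: List.drop)
  let segs := tm.foldl (fun segs m =>
      if PySem.Chars.startswith rem m.toList && !(m.toList == []) then
        segs ++ (d.getD (i + m.toList.length) []).map (fun sub => String.ofList rem :: sub)
      else segs) []
  d.insert i segs

def get_sub_morphemes_alt (word : String) (training_morphemes : List String) : List (List String) :=
  let w := word.toList
  let n := w.length
  let d0 : PySem.Dict Nat (List (List String)) := PySem.Dict.empty.insert n [[]]
  -- reversed(range(n)) = (List.range n).reverse (PySem.List.pyRange_zero_natCast)
  (((List.range n).reverse).foldl (getSubBBody training_morphemes w) d0).getD 0 []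

-- ===== PRECONDITION & SPEC =====
-- Pre_ excludes morpheme lists containing the empty string: there A's recursion never
-- terminates (Python raises RecursionError), so A returns on exactly the inputs admitted here.
def Pre_get_sub_morphemes (word : String) (training_morphemes : List String) : Prop :=
  "" ∉ training_morphemes
instance (word : String) (training_morphemes : List String) : Decidable (Pre_get_sub_morphemes word training_morphemes) := by unfold Pre_get_sub_morphemes; infer_instance

def pvWitness_get_sub_morphemes : String × List String := ("abab", ["a", "b", "ab"])

def Spec_get_sub_morphemes (word : String) (training_morphemes : List String) (out : List (List String)) : Prop := out = get_sub_morphemes_alt word training_morphemes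
instance (word : String) (training_morphemes : List String) (out : List (List String)) : Decidable (Spec_get_sub_morphemes word training_morphemes out) := by unfold Spec_get_sub_morphemes; infer_instance

-- ===== CLAIM (what is proved, stated in full; the proofs are below) =====
def Claim_equal_get_sub_morphemes : Prop := ∀ (word : String) (training_morphemes : List String), Dom_get_sub_morphemes word training_morphemes → Pre_get_sub_morphemes word training_morphemes → Spec_get_sub_morphemes word training_morphemes (get_sub_morphemes word training_morphemes)

-- ===== LEMMAS AND PROOFS =====

-- `s.find(p) == 0` is exactly `p is a prefix of s`
theorem pv_find_zero_iff (s p : List Char) : PySem.Chars.find s p = 0 ↔ p <+: s := by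
  constructor
  · intro h
    have h0 : (0 : Int) ≤ PySem.Chars.find s p := by omega
    have := (PySem.Chars.find_spec h0).1
    simpa [h] using this
  · intro hp
    have h0 : (0 : Int) ≤ PySem.Chars.find s p :=
      (PySem.Chars.find_nonneg_iff s p).2 hp.isInfix
    have hmin := (PySem.Chars.find_spec h0).2
    by_contra hne
    have hpos : 0 < (PySem.Chars.find s p).toNat := by omega
    exact hmin 0 hpos (by simpa using hp)

theorem pv_toList_ne_nil {m : String} (h : m ≠ "") : m.toList ≠ [] := by
  intro hnil
  exact h (by
    have := congrArg String.ofList hnil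
    simpa [String.ofList_toList] using this)

-- fuel irrelevance for A's port: any sufficient fuel yields the canonical value
theorem pv_A_fuel (tm : List String) (hne : "" ∉ tm) :
    ∀ f w, w.length < f → getSubACore tm f w = getSubACore tm (w.length + 1) w := by
  intro f
  induction f using Nat.strong_induction_on with
  | _ f ih =>
    intro w hw
    match f, hw with
    | f'+1, hw =>
      simp only [getSubACore]
      congr 1
      apply PySem.List.foldl_congr_mem
      intro acc m hm
      by_cases hc : PySem.Chars.find w m.toList = 0
      · simp only [hc, if_true]
        have hpre : m.toList <+: w := (pv_find_zero_iff w m.toList).1 hc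
        have hlm : 1 ≤ m.toList.length :=
          List.length_pos_of_ne_nil (pv_toList_ne_nil (fun h => hne (h ▸ hm)))
        have hle : m.toList.length ≤ w.length := hpre.length_le
        have hlen : (w.drop m.toList.length).length = w.length - m.toList.length := by simp
        have h1 : getSubACore tm f' (w.drop m.toList.length)
            = getSubACore tm ((w.drop m.toList.length).length + 1) (w.drop m.toList.length) := by
          apply ih f' (by omega) _ (by omega)
        have h2 : getSubACore tm w.length (w.drop m.toList.length)
            = getSubACore tm ((w.drop m.toList.length).length + 1) (w.drop m.toList.length) := by
          apply ih w.length (by omega) _ (by omega)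
        rw [h1, h2]
      · simp [hc]

-- the canonical value of A on a word
def pvG (tm : List String) (w : List Char) : List (List String) := getSubACore tm (w.length + 1) w

theorem pv_G_nil (tm : List String) : pvG tm [] = [[]] := by
  simp only [pvG, getSubACore, List.length_nil]
  have : tm.foldl (fun acc m => if PySem.Chars.find ([] : List Char) m.toList = 0 then
      acc ++ (getSubACore tm 0 (([] : List Char).drop m.toList.length)).map (fun sub => String.ofList [] :: sub)
      else acc) [] = ([] : List (List String)) := by
    induction tm with
    | nil => simp
    | cons m tm ihm =>
      simp only [List.foldl_cons, getSubACore]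
      split <;> simpa using ihm
  simpa using this

-- invariant of B's backwards loop: the table holds A's canonical value for every suffix already filled
theorem pv_B_loop (tm : List String) (hne : "" ∉ tm) (w : List Char) :
    ∀ k, k ≤ w.length → ∀ d : PySem.Dict Nat (List (List String)),
      (∀ t, k ≤ t → t ≤ w.length → d.getD t [] = pvG tm (w.drop t)) →
      ∀ t, t ≤ w.length →
        (((List.range k).reverse).foldl (getSubBBody tm w) d).getD t [] = pvG tm (w.drop t) := by
  intro k
  induction k with
  | zero =>
    intro _ d hd t ht
    simpa using hd t (Nat.zero_le t) ht
  | succ k ihk =>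
    intro hk d hd t ht
    have hrw : (List.range (k+1)).reverse = k :: (List.range k).reverse := by
      simp [List.range_succ]
    rw [hrw, List.foldl_cons]
    apply ihk (by omega) _ _ t ht
    intro t hkt htn
    show (getSubBBody tm w d k).getD t [] = pvG tm (w.drop t)
    unfold getSubBBody
    rw [PySem.Dict.getD_insert]
    by_cases hteq : t = k
    · subst hteq
      simp only [if_pos rfl]
      -- segs computed at index t equals A's canonical value on the suffix w.drop t
      have hlrem : (w.drop t).length = w.length - t := by simp
      have hrempos : (w.drop t).length ≠ 0 := by omega
      rw [pvG]
      simp only [getSubACore, if_neg hrempos, List.nil_append]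
      apply PySem.List.foldl_congr_mem
      intro acc m hm
      have hmne : m.toList ≠ [] := pv_toList_ne_nil (fun h => hne (h ▸ hm))
      have hlm : 1 ≤ m.toList.length := List.length_pos_of_ne_nil hmne
      by_cases hc : m.toList <+: (w.drop t)
      · have hcondB : (PySem.Chars.startswith (w.drop t) m.toList && !(m.toList == [])) = true := by
          simp [PySem.Chars.startswith_iff, hc, hmne]
        have hcondA : PySem.Chars.find (w.drop t) m.toList = 0 := (pv_find_zero_iff _ _).2 hc
        rw [if_pos hcondB, if_pos hcondA]
        have hle : m.toList.length ≤ (w.drop t).length := hc.length_le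
        have hdrop : (w.drop t).drop m.toList.length = w.drop (t + m.toList.length) := by
          rw [List.drop_drop]
        have hget : d.getD (t + m.toList.length) [] = pvG tm (w.drop (t + m.toList.length)) :=
          hd (t + m.toList.length) (by omega) (by omega)
        have hfuel : getSubACore tm ((w.drop t).length) ((w.drop t).drop m.toList.length)
            = pvG tm ((w.drop t).drop m.toList.length) := by
          rw [pvG]
          apply pv_A_fuel tm hne
          simp only [List.length_drop]
          omega
        rw [hget, ← hdrop, hfuel]
      · have hcondB : ¬ ((PySem.Chars.startswith (w.drop t) m.toList && !(m.toList == [])) = true) := by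
          simp [PySem.Chars.startswith_iff, hc]
        have hcondA : ¬ (PySem.Chars.find (w.drop t) m.toList = 0) := fun h => hc ((pv_find_zero_iff _ _).1 h)
        rw [if_neg hcondB, if_neg hcondA]
    · rw [if_neg hteq]
      exact hd t (by omega) htn

-- ===== VERDICT (by name: the statement is the Claim_ definition above) =====
theorem get_sub_morphemes_spec : Claim_equal_get_sub_morphemes := by
  intro word tm _ hpre
  unfold Spec_get_sub_morphemes get_sub_morphemes get_sub_morphemes_alt
  have h := pv_B_loop tm hpre word.toList word.toList.length le_rfl
      (PySem.Dict.empty.insert word.toList.length [[]])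
      (by
        intro t h1 h2
        have : t = word.toList.length := by omega
        subst this
        rw [PySem.Dict.getD_insert_self, List.drop_length, pv_G_nil tm])
      0 (Nat.zero_le _)
  simpa [pvG] using h.symm
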